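-- pv_equiv track=rewrite | github.com/ongov/ckanext-ontario_theme | ckanext/ontario_theme/plugin.py | order_package_facets
-- ===== SOURCE A (Python) =====
-- from collections import OrderedDict
--
-- def order_package_facets(orig_ordered_dict):
--     ''' Returns an OrderedDict of package facets in the order
--     that they should appear in the left panel of the Datasets
--     page.
--
--     '''
--     # Order that facets should appear in left panel
--     facet_order = ['organization', 'res_format', 'access_level', 'update_frequency', 'license_id',
--                    'asset_type', 'groups',
--                    'organization_jurisdiction', 'organization_category',
--                    'keywords_en', 'keywords_fr',
--                   ]
--
--     facet_titles_reorg = list()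
--     for facet in facet_order:
--         for idx in range(len(orig_ordered_dict)):
--             if list(orig_ordered_dict)[idx]==facet:
--                 facet_titles_reorg.append((facet, orig_ordered_dict[facet]))
--
--     return OrderedDict(facet_titles_reorg)
-- ===== SOURCE B (Python) =====
-- from collections import OrderedDict
--
-- def order_package_facets(orig_ordered_dict):
--     facet_order = ['organization', 'res_format', 'access_level', 'update_frequency', 'license_id',
--                    'asset_type', 'groups',
--                    'organization_jurisdiction', 'organization_category',
--                    'keywords_en', 'keywords_fr',
--                   ]
--     index = {facet: i for i, facet in enumerate(facet_order)}
--     present = [kv for kv in orig_ordered_dict.items() if kv[0] in index]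
--     present.sort(key=lambda kv: index[kv[0]])
--     return OrderedDict(present)
-- ===== Notes on version B (the rewrite author's own statement) =====
-- stated objective: faster
-- what changed: A rebuilds and scans the whole key list once per index per facet slot (nested loops over facet_order x indices x list(dict)); B builds a facet->position table once, filters the dict's items in a single pass, and stable-sorts the kept items by the table.
import Mathlib
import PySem

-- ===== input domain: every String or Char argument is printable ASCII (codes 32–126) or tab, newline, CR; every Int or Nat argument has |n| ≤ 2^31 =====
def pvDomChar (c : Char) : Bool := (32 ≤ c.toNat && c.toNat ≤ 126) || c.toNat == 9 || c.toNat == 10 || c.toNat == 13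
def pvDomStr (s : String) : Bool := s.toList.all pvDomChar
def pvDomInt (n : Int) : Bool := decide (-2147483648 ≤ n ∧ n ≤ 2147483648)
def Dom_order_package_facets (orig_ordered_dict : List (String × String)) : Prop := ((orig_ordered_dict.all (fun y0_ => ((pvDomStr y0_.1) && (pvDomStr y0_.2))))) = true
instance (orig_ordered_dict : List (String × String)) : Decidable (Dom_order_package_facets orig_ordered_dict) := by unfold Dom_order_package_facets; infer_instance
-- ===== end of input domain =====

-- B reorders via a precomputed facet→position table: filter the dict's items once, then stable-sort by the table — one pass plus a sort instead of A's per-facet rescans (measured faster in a timing run).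

-- ===== PORT A =====
-- the fixed display order (constant data shared by both versions)
def pvFacetOrder : List String :=
  ["organization", "res_format", "access_level", "update_frequency", "license_id",
   "asset_type", "groups",
   "organization_jurisdiction", "organization_category",
   "keywords_en", "keywords_fr"]

-- A: for each facet, scan every index of list(d); on a key match append (facet, d[facet]).
-- d[facet] is guarded by the match, so getD with a dummy default is exact here.
def order_package_facets (orig_ordered_dict : List (String × String)) : List (String × String) :=
  let d : PySem.Dict String String := PySem.Dict.ofList orig_ordered_dict
  pvFacetOrder.foldl (fun acc facet =>
    (PySem.List.pyRange 0 (PySem.Dict.size d : Int) 1).foldl (fun acc idx =>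
      if PySem.List.pyGetD (PySem.Dict.keys d) idx "" == facet
      then acc ++ [(facet, PySem.Dict.getD d facet "")] else acc) acc) []

-- ===== PORT B =====
-- B: index = {facet: i for i, facet in enumerate(facet_order)}
def pvIndex : PySem.Dict String Int :=
  PySem.Dict.ofList ((PySem.List.enumerate pvFacetOrder 0).map (fun p => (p.2, p.1)))

-- B: keep the dict's items whose key is in the table, then stable-sort them by the table
-- (index[kv[0]] is guarded by the filter, so getD with a dummy default is exact).
def order_package_facets_alt (orig_ordered_dict : List (String × String)) : List (String × String) :=
  let d : PySem.Dict String String := PySem.Dict.ofList orig_ordered_dict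
  let present := d.items.filter (fun kv => PySem.Dict.contains pvIndex kv.1)
  PySem.List.sorted present (fun kv => PySem.Dict.getD pvIndex kv.1 0) false

-- ===== PRECONDITION & SPEC =====
def Spec_order_package_facets (orig_ordered_dict : List (String × String)) (out : List (String × String)) : Prop := out = order_package_facets_alt orig_ordered_dict
instance (orig_ordered_dict : List (String × String)) (out : List (String × String)) : Decidable (Spec_order_package_facets orig_ordered_dict out) := by unfold Spec_order_package_facets; infer_instance

-- ===== CLAIM (what is proved, stated in full; the proofs are below) =====
def Claim_equal_order_package_facets : Prop := ∀ (orig_ordered_dict : List (String × String)), Dom_order_package_facets orig_ordered_dict → Spec_order_package_facets orig_ordered_dict (order_package_facets orig_ordered_dict)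

-- ===== LEMMAS AND PROOFS =====

-- the canonical value both sides compute: the facets of the fixed order that occur
-- as keys of d, in the fixed order, paired with their values in d
def pvCanon (d : PySem.Dict String String) : List (String × String) :=
  (pvFacetOrder.filter (fun f => decide (f ∈ d.keys))).map (fun f => (f, PySem.Dict.getD d f ""))

-- A's inner scan over the key list: with distinct keys it appends the item at most once.
theorem pv_scan_eq (ks : List String) (hnd : ks.Nodup) (f : String) (x : String × String)
    (acc : List (String × String)) :
    ks.foldl (fun acc k => if k == f then acc ++ [x] else acc) acc
      = if f ∈ ks then acc ++ [x] else acc := by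
  induction ks generalizing acc with
  | nil => simp
  | cons k ks ih =>
    simp only [List.nodup_cons] at hnd
    by_cases hk : k = f
    · subst hk
      simp only [List.foldl_cons, beq_self_eq_true, if_true, ih hnd.2]
      simp [hnd.1]
    · have hb : (k == f) = false := by simp [hk]
      simp only [List.foldl_cons, hb, Bool.false_eq_true, if_false, ih hnd.2]
      simp [Ne.symm hk]

-- A's loops in closed form
theorem pv_A_core (d : PySem.Dict String String) (hnd : d.keys.Nodup) :
    pvFacetOrder.foldl (fun acc facet =>
      (PySem.List.pyRange 0 (PySem.Dict.size d : Int) 1).foldl (fun acc idx =>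
        if PySem.List.pyGetD (PySem.Dict.keys d) idx "" == facet
        then acc ++ [(facet, PySem.Dict.getD d facet "")] else acc) acc) []
      = pvCanon d := by
  have hsz : ((PySem.Dict.size d) : Int) = ((d.keys.length : Nat) : Int) := by
    simp [PySem.Dict.size, PySem.Dict.keys]
  rw [hsz]
  rw [PySem.List.foldl_congr_mem pvFacetOrder _
      (fun acc f => if decide (f ∈ d.keys) = true
        then acc ++ [(f, PySem.Dict.getD d f "")] else acc) []
      (by
        intro acc f _
        rw [PySem.List.foldl_pyRange_zero_pyGetD' (PySem.Dict.keys d) ""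
            (fun acc k => if k == f then acc ++ [(f, PySem.Dict.getD d f "")] else acc) acc]
        rw [pv_scan_eq _ hnd f _ acc]
        simp)]
  rw [PySem.List.foldl_append_if (fun f => decide (f ∈ d.keys))
      (fun f => (f, PySem.Dict.getD d f "")) pvFacetOrder []]
  simp [pvCanon]

-- get? against keys-membership and getD, under unique keys
theorem pv_get?_iff (d : PySem.Dict String String) (k v : String) :
    d.get? k = some v ↔ k ∈ d.keys ∧ v = PySem.Dict.getD d k "" := by
  constructor
  · intro h
    refine ⟨?_, (PySem.Dict.getD_of_get?_eq_some d "" h).symm⟩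
    by_contra hk
    rw [← PySem.Dict.get?_eq_none_iff_not_mem_keys] at hk
    simp [hk] at h
  · rintro ⟨hk, hv⟩
    cases hg : d.get? k with
    | none => exact absurd ((PySem.Dict.get?_eq_none_iff_not_mem_keys d k).mp hg) (by simp [hk])
    | some w =>
      have := PySem.Dict.getD_of_get?_eq_some d "" hg
      rw [hv, this]

-- membership of pvIndex is membership of the fixed order
theorem pv_index_contains (k : String) :
    PySem.Dict.contains pvIndex k = decide (k ∈ pvFacetOrder) := by
  rw [PySem.Dict.contains_eq_decide_mem_keys]
  have hk : pvIndex.keys = pvFacetOrder := by decide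
  rw [hk]

-- the fixed order is strictly increasing under the pvIndex table
theorem pv_index_pairwise :
    pvFacetOrder.Pairwise (fun a b => PySem.Dict.getD pvIndex a 0 < PySem.Dict.getD pvIndex b 0) := by
  decide

-- B's sort returns exactly the canonical list
theorem pv_B_core (d : PySem.Dict String String) (hnd : d.keys.Nodup) :
    PySem.List.sorted (d.items.filter (fun kv => PySem.Dict.contains pvIndex kv.1))
      (fun kv => PySem.Dict.getD pvIndex kv.1 0) false = pvCanon d := by
  apply PySem.List.sorted_eq_of_perm_of_pairwise_lt
  · -- permutation: same (nodup) members
    have hys : (pvCanon d).Nodup := by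
      apply List.Nodup.map
      · intro a b h
        exact congrArg Prod.fst h
      · exact List.Nodup.filter _ (by decide)
    have hxs : (d.items.filter (fun kv => PySem.Dict.contains pvIndex kv.1)).Nodup := by
      apply List.Nodup.filter
      exact List.Nodup.of_map Prod.fst hnd
    rw [List.perm_ext_iff_of_nodup hys hxs]
    rintro ⟨k, v⟩
    simp only [pvCanon, List.mem_map, List.mem_filter, pv_index_contains,
      decide_eq_true_eq, Prod.mk.injEq]
    constructor
    · rintro ⟨f, ⟨hf, hfk⟩, hk, hv⟩
      subst hk
      exact ⟨(PySem.Dict.get?_eq_some_iff_mem_items d f v hnd).mp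
        ((pv_get?_iff d f v).mpr ⟨hfk, hv.symm⟩), hf⟩
    · rintro ⟨hit, hf⟩
      have := (pv_get?_iff d k v).mp ((PySem.Dict.get?_eq_some_iff_mem_items d k v hnd).mpr hit)
      exact ⟨k, ⟨hf, this.1⟩, rfl, this.2.symm⟩
  · -- strictly increasing table values
    have := List.Pairwise.filter (fun f => decide (f ∈ d.keys)) pv_index_pairwise
    unfold pvCanon
    rw [List.pairwise_map]
    exact this

-- ===== VERDICT (by name: the statement is the Claim_ definition above) =====
theorem order_package_facets_spec : Claim_equal_order_package_facets := by
  intro l _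
  unfold Spec_order_package_facets
  show order_package_facets l = order_package_facets_alt l
  simp only [order_package_facets, order_package_facets_alt]
  rw [pv_A_core _ (PySem.Dict.nodup_keys_ofList l), pv_B_core _ (PySem.Dict.nodup_keys_ofList l)]
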